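-- pv_equiv track=rewrite | github.com/kriskros341/concreteAbstractions | send_help.py | only_one_of_each_kind_with_leftovers
-- ===== SOURCE A (Python) =====
-- def only_one_of_each_kind_with_leftovers(prize_list, amount, itere=0):
--     if not prize_list:
--         return itere
--     if amount-prize_list[0] < 0:
--         return 0
--     return (
--         itere+only_one_of_each_kind_with_leftovers([x for x in prize_list if x !=prize_list[0]], amount-prize_list[0], itere+1) +
--         only_one_of_each_kind_with_leftovers(prize_list[1:], amount, itere))
-- ===== SOURCE B (Python) =====
-- def only_one_of_each_kind_with_leftovers(prize_list, amount, itere=0):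
--     # The result is affine in itere: compute (constant, coefficient) pairs by a
--     # recursion on (list, amount), memoized in a dictionary, and combine at the end.
--     memo = {}
--     def coeffs(lst, amt):
--         if not lst:
--             return (0, 1)
--         if amt - lst[0] < 0:
--             return (0, 0)
--         key = (tuple(lst), amt)
--         if key in memo:
--             return memo[key]
--         a1, b1 = coeffs([x for x in lst if x != lst[0]], amt - lst[0])
--         a2, b2 = coeffs(lst[1:], amt)
--         res = (a1 + b1 + a2, 1 + b1 + b2)
--         memo[key] = res
--         return res
--     a, b = coeffs(prize_list, amount)
--     return a + b * itere
-- ===== Notes on version B (the rewrite author's own statement) =====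
-- stated objective: alternative
-- what changed: A threads the running counter 'itere' through the double recursion; B observes the result is affine in itere and computes (constant, coefficient) pairs by a recursion on (list, amount) memoized in a dictionary, returning const + coeff*itere.
import Mathlib
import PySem

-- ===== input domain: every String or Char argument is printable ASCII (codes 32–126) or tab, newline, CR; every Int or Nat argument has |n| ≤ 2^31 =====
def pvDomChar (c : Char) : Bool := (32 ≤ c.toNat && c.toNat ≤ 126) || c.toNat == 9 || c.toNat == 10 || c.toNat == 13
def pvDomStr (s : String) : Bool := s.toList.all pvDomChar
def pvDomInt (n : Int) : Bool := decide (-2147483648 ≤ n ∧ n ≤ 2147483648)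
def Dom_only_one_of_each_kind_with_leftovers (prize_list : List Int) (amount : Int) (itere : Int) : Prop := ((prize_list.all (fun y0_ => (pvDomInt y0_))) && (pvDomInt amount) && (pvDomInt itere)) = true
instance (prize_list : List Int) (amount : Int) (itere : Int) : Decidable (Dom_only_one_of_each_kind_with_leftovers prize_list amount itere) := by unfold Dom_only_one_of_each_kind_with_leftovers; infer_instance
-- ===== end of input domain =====

-- B replaces A's itere-threading double recursion by (constant, coefficient) pairs
-- memoized on (list, amount) — the result is affine in itere; objective: alternative.

-- termination helper cited by both ports' decreasing_by
theorem pvFilterNeLen (h : Int) (t : List Int) :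
    ((h :: t).filter (fun x => x ≠ h)).length ≤ t.length := by
  simp
  exact List.length_filter_le _ t

-- ===== PORT A =====
def only_one_of_each_kind_with_leftovers (prize_list : List Int) (amount : Int) (itere : Int) : Int :=
  match prize_list with
  | [] => itere
  | h :: t =>
    if amount - h < 0 then 0
    else
      itere + only_one_of_each_kind_with_leftovers ((h :: t).filter (fun x => x ≠ h)) (amount - h) (itere + 1)
        + only_one_of_each_kind_with_leftovers t amount itere
termination_by prize_list.length
decreasing_by
  · have := pvFilterNeLen h t; simp only [List.length_cons]; omega
  · simp only [List.length_cons]; omega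

-- ===== PORT B =====
-- memoized recursion: memo maps (list, amount) to the (constant, coefficient) pair
def pvAltCoeffs (lst : List Int) (amt : Int)
    (memo : PySem.Dict (List Int × Int) (Int × Int)) :
    (Int × Int) × PySem.Dict (List Int × Int) (Int × Int) :=
  match lst with
  | [] => ((0, 1), memo)
  | h :: t =>
    if amt - h < 0 then ((0, 0), memo)
    else
      match memo.get? ((h :: t, amt)) with
      | some v => (v, memo)
      | none =>
        let r1 := pvAltCoeffs ((h :: t).filter (fun x => x ≠ h)) (amt - h) memo
        let r2 := pvAltCoeffs t amt r1.2
        let res := (r1.1.1 + r1.1.2 + r2.1.1, 1 + r1.1.2 + r2.1.2)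
        (res, r2.2.insert ((h :: t, amt)) res)
termination_by lst.length
decreasing_by
  · have := pvFilterNeLen h t; simp only [List.length_cons]; omega
  · simp only [List.length_cons]; omega

def only_one_of_each_kind_with_leftovers_alt (prize_list : List Int) (amount : Int) (itere : Int) : Int :=
  let p := (pvAltCoeffs prize_list amount PySem.Dict.empty).1
  p.1 + p.2 * itere

-- ===== PRECONDITION & SPEC =====
def Spec_only_one_of_each_kind_with_leftovers (prize_list : List Int) (amount : Int) (itere : Int) (out : Int) : Prop := out = only_one_of_each_kind_with_leftovers_alt prize_list amount itere
instance (prize_list : List Int) (amount : Int) (itere : Int) (out : Int) : Decidable (Spec_only_one_of_each_kind_with_leftovers prize_list amount itere out) := by unfold Spec_only_one_of_each_kind_with_leftovers; infer_instance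

-- ===== CLAIM (what is proved, stated in full; the proofs are below) =====
def Claim_equal_only_one_of_each_kind_with_leftovers : Prop := ∀ (prize_list : List Int) (amount : Int) (itere : Int), Dom_only_one_of_each_kind_with_leftovers prize_list amount itere → Spec_only_one_of_each_kind_with_leftovers prize_list amount itere (only_one_of_each_kind_with_leftovers prize_list amount itere)

-- ===== LEMMAS AND PROOFS =====

-- unmemoized (constant, coefficient) spec of the recursion
def pvG (lst : List Int) (amt : Int) : Int × Int :=
  match lst with
  | [] => (0, 1)
  | h :: t =>
    if amt - h < 0 then (0, 0)
    else
      let p1 := pvG ((h :: t).filter (fun x => x ≠ h)) (amt - h)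
      let p2 := pvG t amt
      (p1.1 + p1.2 + p2.1, 1 + p1.2 + p2.2)
termination_by lst.length
decreasing_by
  · have := pvFilterNeLen h t; simp only [List.length_cons]; omega
  · simp only [List.length_cons]; omega

-- A is affine in itere with pvG's coefficients
theorem pvAffine (n : Nat) : ∀ (lst : List Int) (amt itere : Int), lst.length ≤ n →
    only_one_of_each_kind_with_leftovers lst amt itere = (pvG lst amt).1 + (pvG lst amt).2 * itere := by
  induction n with
  | zero =>
    intro lst amt itere hlen
    have : lst = [] := List.eq_nil_of_length_eq_zero (Nat.le_zero.mp hlen)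
    subst this
    simp [only_one_of_each_kind_with_leftovers, pvG]
  | succ n ih =>
    intro lst amt itere hlen
    match lst with
    | [] => simp [only_one_of_each_kind_with_leftovers, pvG]
    | h :: t =>
      rw [only_one_of_each_kind_with_leftovers, pvG]
      by_cases hc : amt - h < 0
      · simp [hc]
      · simp only [if_neg hc]
        have h1 : ((h :: t).filter (fun x => x ≠ h)).length ≤ n := by
          have := pvFilterNeLen h t; simp at hlen; omega
        have h2 : t.length ≤ n := by simp at hlen; omega
        rw [ih _ _ (itere + 1) h1, ih _ _ itere h2]
        ring

def pvInv (memo : PySem.Dict (List Int × Int) (Int × Int)) : Prop :=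
  ∀ (l : List Int) (a : Int) (v : Int × Int), memo.get? (l, a) = some v → v = pvG l a

theorem pvCoeffsCorrect (n : Nat) : ∀ (lst : List Int) (amt : Int)
    (memo : PySem.Dict (List Int × Int) (Int × Int)), lst.length ≤ n → pvInv memo →
    (pvAltCoeffs lst amt memo).1 = pvG lst amt ∧ pvInv (pvAltCoeffs lst amt memo).2 := by
  induction n with
  | zero =>
    intro lst amt memo hlen hinv
    have hnil : lst = [] := List.eq_nil_of_length_eq_zero (Nat.le_zero.mp hlen)
    subst hnil
    rw [pvAltCoeffs]
    exact ⟨by simp [pvG], hinv⟩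
  | succ n ih =>
    intro lst amt memo hlen hinv
    cases lst with
    | nil => rw [pvAltCoeffs]; exact ⟨by simp [pvG], hinv⟩
    | cons h t =>
      have h1 : ((h :: t).filter (fun x => x ≠ h)).length ≤ n := by
        have := pvFilterNeLen h t; simp at hlen; omega
      have h2 : t.length ≤ n := by simp at hlen; omega
      rw [pvAltCoeffs]
      by_cases hc : amt - h < 0
      · simp only [if_pos hc]
        exact ⟨by rw [pvG]; simp [hc], hinv⟩
      · simp only [if_neg hc]
        cases hget : memo.get? ((h :: t, amt)) with
        | some v => exact ⟨hinv _ _ _ hget, hinv⟩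
        | none =>
          obtain ⟨e1, i1⟩ := ih ((h :: t).filter (fun x => x ≠ h)) (amt - h) memo h1 hinv
          obtain ⟨e2, i2⟩ := ih t amt _ h2 i1
          have hres : ((pvAltCoeffs ((h :: t).filter (fun x => x ≠ h)) (amt - h) memo).1.1 +
              (pvAltCoeffs ((h :: t).filter (fun x => x ≠ h)) (amt - h) memo).1.2 +
              (pvAltCoeffs t amt (pvAltCoeffs ((h :: t).filter (fun x => x ≠ h)) (amt - h) memo).2).1.1,
              1 + (pvAltCoeffs ((h :: t).filter (fun x => x ≠ h)) (amt - h) memo).1.2 +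
              (pvAltCoeffs t amt (pvAltCoeffs ((h :: t).filter (fun x => x ≠ h)) (amt - h) memo).2).1.2) =
              pvG (h :: t) amt := by
            rw [pvG]; simp only [if_neg hc]; rw [e1, e2]
          refine ⟨hres, ?_⟩
          intro l a v hv
          try simp only at hv
          rw [PySem.Dict.get?_insert] at hv
          split at hv
          · rename_i heq
            injection heq with hl ha
            cases hv; subst hl; subst ha; exact hres
          · exact i2 _ _ _ hv

-- ===== VERDICT (by name: the statement is the Claim_ definition above) =====
theorem only_one_of_each_kind_with_leftovers_spec : Claim_equal_only_one_of_each_kind_with_leftovers := by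
  intro prize_list amount itere _
  unfold Spec_only_one_of_each_kind_with_leftovers only_one_of_each_kind_with_leftovers_alt
  have hinv : pvInv PySem.Dict.empty := by
    intro l a v hv; simp [PySem.Dict.get?_empty] at hv
  obtain ⟨he, _⟩ := pvCoeffsCorrect prize_list.length prize_list amount PySem.Dict.empty le_rfl hinv
  rw [he, pvAffine prize_list.length prize_list amount itere le_rfl]
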